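-- pv_equiv track=rewrite | github.com/anon-noob/mothballapp2 | BaseMothballSimulation.py | clean_backslashes
-- ===== SOURCE A (Python) =====
-- def clean_backslashes(string: str):
--     "Replaces backslashes if possible. Anything with `\\0` followed by a char will be replaced."
--     chars = [""] * len(string)
--     follows_backslash = False
--     prev_char = ""
--     for i, char in enumerate(string):
--         if char == "\\" and not follows_backslash:
--             follows_backslash = True
--         else:
--             follows_backslash = False
--             if char == "n":
--                 chars[i] = "\n"
--             else:
--                 chars[i] = char
--     return "".join(chars)
-- ===== SOURCE B (Python) =====
-- def clean_backslashes(string: str):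
--     "Replaces backslashes if possible. Anything with `\\0` followed by a char will be replaced."
--     out = []
--     i = 0
--     n = len(string)
--     while i < n:
--         if string[i] == "\\":
--             j = i
--             while j < n and string[j] == "\\":
--                 j += 1
--             out.append("\\" * ((j - i) // 2))
--             i = j
--         else:
--             out.append("\n" if string[i] == "n" else string[i])
--             i += 1
--     return "".join(out)
-- ===== Notes on version B (the rewrite author's own statement) =====
-- stated objective: alternative
-- what changed: A's per-character state machine with a follows_backslash flag writing into a preallocated slot list is replaced by a run-based scan: each maximal run of k backslashes is emitted as k//2 backslashes at once and 'n' outside runs becomes a newline.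
import Mathlib
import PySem

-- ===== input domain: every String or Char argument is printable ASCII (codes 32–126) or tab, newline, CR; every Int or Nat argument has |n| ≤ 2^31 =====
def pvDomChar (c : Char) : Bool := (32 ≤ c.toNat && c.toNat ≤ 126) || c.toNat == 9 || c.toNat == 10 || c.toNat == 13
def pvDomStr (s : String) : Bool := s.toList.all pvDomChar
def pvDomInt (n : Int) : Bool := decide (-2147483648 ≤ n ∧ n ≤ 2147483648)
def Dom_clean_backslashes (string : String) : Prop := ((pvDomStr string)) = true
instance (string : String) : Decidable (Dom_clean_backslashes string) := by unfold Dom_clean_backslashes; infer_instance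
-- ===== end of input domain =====

-- B replaces A's per-character backslash state machine by run extraction: each maximal run of
-- k backslashes becomes k/2 backslashes, every 'n' outside runs becomes a newline (objective: alternative).

-- ===== PORT A =====
-- literal port of A: a list of per-index strings filled in by an enumerate loop with a
-- follows_backslash flag, then joined with "".join
def clean_backslashes (string : String) : String :=
  let chars := PySem.List.pyRepeat [("" : String)] (PySem.Str.len string)
  let r := (PySem.List.enumerate string.toList).foldl
    (fun (st : List String × Bool) (ic : Int × Char) =>
      if ic.2 == '\\' && !st.2 then (st.1, true)
      else (PySem.List.pySetD st.1 ic.1 (if ic.2 == 'n' then "\n" else String.ofList [ic.2]), false))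
    (chars, false)
  PySem.Str.join "" r.1

-- ===== PORT B =====
-- run-based scan of Source B: the outer while-loop over positions becomes recursion on the char list,
-- the inner while-loop that finds the end of a backslash run becomes takeWhile/dropWhile
def cleanGo (cs : List Char) : List Char :=
  match cs with
  | [] => []
  | c :: rest =>
    if c = '\\' then
      List.replicate ((1 + (rest.takeWhile (· = '\\')).length) / 2) '\\'
        ++ cleanGo (rest.dropWhile (· = '\\'))
    else (if c = 'n' then '\n' else c) :: cleanGo rest
termination_by cs.length
decreasing_by
  · exact Nat.lt_succ_of_le (List.length_dropWhile_le _ _)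
  · simp

def clean_backslashes_alt (string : String) : String :=
  String.ofList (cleanGo string.toList)

-- ===== PRECONDITION & SPEC =====
def Spec_clean_backslashes (string : String) (out : String) : Prop := out = clean_backslashes_alt string
instance (string : String) (out : String) : Decidable (Spec_clean_backslashes string out) := by unfold Spec_clean_backslashes; infer_instance

-- ===== CLAIM (what is proved, stated in full; the proofs are below) =====
def Claim_equal_clean_backslashes : Prop := ∀ (string : String), Dom_clean_backslashes string → Spec_clean_backslashes string (clean_backslashes string)

-- ===== LEMMAS AND PROOFS =====

-- the per-index strings A's loop writes (skipped slots keep their initial "")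
def mlist : Bool → List Char → List String
  | _, [] => []
  | fb, c :: cs =>
    if c = '\\' ∧ fb = false then "" :: mlist true cs
    else (if c = 'n' then "\n" else String.ofList [c]) :: mlist false cs

-- the characters of the common result
def mchars : Bool → List Char → List Char
  | _, [] => []
  | fb, c :: cs =>
    if c = '\\' ∧ fb = false then mchars true cs
    else (if c = 'n' then '\n' else c) :: mchars false cs

theorem set_at_length {α : Type} (pre : List α) (x v : α) (rest : List α) :
    (pre ++ x :: rest).set pre.length v = pre ++ v :: rest := by
  induction pre with
  | nil => rfl
  | cons p pre ih => simpa [List.set] using ih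

theorem foldA (cs : List Char) (pre : List String) (fb : Bool) :
    ((PySem.List.enumerate cs (pre.length : Int)).foldl
      (fun (st : List String × Bool) (ic : Int × Char) =>
        if ic.2 == '\\' && !st.2 then (st.1, true)
        else (PySem.List.pySetD st.1 ic.1 (if ic.2 == 'n' then "\n" else String.ofList [ic.2]), false))
      (pre ++ List.replicate cs.length "", fb)).1
    = pre ++ mlist fb cs := by
  induction cs generalizing pre fb with
  | nil => simp [PySem.List.enumerate, mlist]
  | cons c cs ih =>
    rw [PySem.List.enumerate_cons]
    simp only [List.foldl_cons, List.length_cons, List.replicate_succ]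
    by_cases hc : c = '\\' ∧ fb = false
    · obtain ⟨hc1, hc2⟩ := hc
      subst hc1; subst hc2
      rw [if_pos (by simp)]
      have h1 : pre ++ "" :: List.replicate cs.length "" =
          (pre ++ [""]) ++ List.replicate cs.length "" := by simp
      have h2 : (pre.length : Int) + 1 = (((pre ++ [""]).length : Nat) : Int) := by
        simp
      rw [h1, h2, ih (pre ++ [""]) true]
      simp [mlist]
    · have hcond : ¬ ((c == '\\' && !fb) = true) := by
        cases fb with
        | true => simp
        | false =>
          have : ¬ c = '\\' := fun h' => hc ⟨h', rfl⟩
          simp [this]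
      rw [if_neg hcond]
      have hset : PySem.List.pySetD (pre ++ "" :: List.replicate cs.length "")
          (pre.length : Int) (if c == 'n' then "\n" else String.ofList [c])
          = pre ++ (if c == 'n' then "\n" else String.ofList [c]) :: List.replicate cs.length "" := by
        rw [PySem.List.pySetD_of_nonneg _ _ (by positivity)]
        simpa using set_at_length pre "" _ (List.replicate cs.length "")
      rw [hset]
      have h1 : pre ++ (if c == 'n' then "\n" else String.ofList [c]) :: List.replicate cs.length "" =
          (pre ++ [if c == 'n' then "\n" else String.ofList [c]]) ++ List.replicate cs.length "" := by simp
      have h2 : (pre.length : Int) + 1 = (((pre ++ [if c == 'n' then "\n" else String.ofList [c]]).length : Nat) : Int) := by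
        simp
      rw [h1, h2, ih _ false]
      simp only [mlist, if_neg hc]
      by_cases hn : c = 'n' <;> simp [hn]

-- "".join is concatenation
theorem join_empty_sep (ps : List String) :
    PySem.Chars.join [] (ps.map String.toList) = (ps.map String.toList).flatten := by
  induction ps with
  | nil => simp [PySem.Chars.join_nil]
  | cons p ps ih =>
    cases ps with
    | nil => simp [PySem.Chars.join_singleton]
    | cons q qs =>
      simp only [List.map_cons] at ih ⊢
      rw [PySem.Chars.join_cons_cons, ih]
      simp

theorem flatten_mlist (fb : Bool) (cs : List Char) :
    ((mlist fb cs).map String.toList).flatten = mchars fb cs := by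
  induction cs generalizing fb with
  | nil => simp [mlist, mchars]
  | cons c cs ih =>
    simp only [mlist, mchars]
    by_cases hc : c = '\\' ∧ fb = false
    · rw [if_pos hc, if_pos hc]
      simpa using ih true
    · rw [if_neg hc, if_neg hc]
      by_cases hn : c = 'n' <;> simp [hn, ih false]

-- mchars ignores the flag when the next char is not a backslash
theorem mchars_flag (rest : List Char) (h : ∀ c, rest.head? = some c → c ≠ '\\') :
    mchars true rest = mchars false rest := by
  cases rest with
  | nil => rfl
  | cons c cs =>
    have hc : c ≠ '\\' := h c rfl
    simp [mchars, hc]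

theorem mchars_run (m : Nat) (rest : List Char) (h : ∀ c, rest.head? = some c → c ≠ '\\') :
    mchars false (List.replicate m '\\' ++ rest)
      = List.replicate (m / 2) '\\' ++ mchars false rest := by
  induction m using Nat.strong_induction_on with
  | _ m ih =>
    match m with
    | 0 => simp
    | 1 =>
      simp only [List.replicate_one, List.singleton_append]
      have h1 : mchars false ('\\' :: rest) = mchars true rest := by simp [mchars]
      rw [h1, mchars_flag rest h]
      simp
    | (m + 2) =>
      have h1 : List.replicate (m + 2) '\\' ++ rest
          = '\\' :: '\\' :: (List.replicate m '\\' ++ rest) := by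
        simp [List.replicate_succ]
      rw [h1]
      have h2 : mchars false ('\\' :: '\\' :: (List.replicate m '\\' ++ rest))
          = '\\' :: mchars false (List.replicate m '\\' ++ rest) := by
        simp [mchars]
      rw [h2, ih m (by omega)]
      have h3 : (m + 2) / 2 = m / 2 + 1 := by omega
      rw [h3, List.replicate_succ]
      simp

theorem cleanGo_eq_aux : ∀ (n : Nat) (cs : List Char), cs.length ≤ n →
    cleanGo cs = mchars false cs := by
  intro n
  induction n with
  | zero =>
    intro cs hcs
    have : cs = [] := List.eq_nil_of_length_eq_zero (Nat.le_zero.mp hcs)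
    subst this
    rw [cleanGo]
    simp [mchars]
  | succ n ih =>
    intro cs hcs
    cases cs with
    | nil =>
      rw [cleanGo]
      simp [mchars]
    | cons c rest =>
      simp only [List.length_cons, Nat.succ_le_succ_iff] at hcs
      by_cases hc : c = '\\'
      · subst hc
        rw [cleanGo, if_pos rfl]
        have htw : rest.takeWhile (· = '\\') = List.replicate (rest.takeWhile (· = '\\')).length '\\' := by
          apply List.eq_replicate_of_mem
          intro x hx
          simpa using List.mem_takeWhile_imp hx
        have hrest : rest = List.replicate (rest.takeWhile (· = '\\')).length '\\'
            ++ rest.dropWhile (· = '\\') := by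
          conv_lhs => rw [← List.takeWhile_append_dropWhile (p := (· = '\\')) (l := rest)]
          rw [← htw]
        have hhead : ∀ d, (rest.dropWhile (· = '\\')).head? = some d → d ≠ '\\' := by
          intro d hd hde
          have hw := List.head?_dropWhile_not (p := (· = '\\')) (l := rest)
          rw [hd] at hw
          simp [hde] at hw
        have hms : mchars false ('\\' :: rest)
            = mchars false (List.replicate (1 + (rest.takeWhile (· = '\\')).length) '\\'
                ++ rest.dropWhile (· = '\\')) := by
          rw [List.replicate_add]
          simp only [List.replicate_one, List.singleton_append]
          conv_lhs => rw [hrest]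
          simp
        rw [hms, mchars_run _ _ hhead,
          ih _ (le_trans (List.length_dropWhile_le _ _) hcs)]
      · rw [cleanGo, if_neg hc]
        have hms : mchars false (c :: rest) = (if c = 'n' then '\n' else c) :: mchars false rest := by
          simp [mchars, hc]
        rw [hms, ih _ hcs]

-- ===== VERDICT (by name: the statement is the Claim_ definition above) =====
theorem clean_backslashes_spec : Claim_equal_clean_backslashes := by
  intro s _
  show clean_backslashes s = clean_backslashes_alt s
  rw [← String.toList_inj]
  unfold clean_backslashes clean_backslashes_alt
  simp only [PySem.Str.len_eq, PySem.List.pyRepeat_singleton, Int.toNat_natCast]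
  have hf := foldA s.toList [] false
  simp only [List.length_nil, Nat.cast_zero, List.nil_append] at hf
  rw [hf, PySem.Str.toList_join, String.toList_ofList,
    cleanGo_eq_aux s.toList.length s.toList le_rfl]
  rw [join_empty_sep, flatten_mlist, String.toList_ofList]
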